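-- pv_equiv track=rewrite | github.com/nmi21/euler | 090/main.py | check_dice
-- ===== SOURCE A (Python) =====
-- def check_dice(die1, die2):
--     # for a given pair of dice: die1 and die2
--     # check to see if you can make all perfect squares
--
--     perfect_squares = set([
--         (0, 1),
--         (0, 4),
--         (0, 9),
--         (1, 6),
--         (2, 5),
--         (3, 6),
--         (4, 9),
--         (6, 4),
--         (8, 1)
--     ])
--
--     # create copies and add necessary 6 or 9
--     cube1 = set(die1)
--     cube2 = set(die2)
--
--     if 6 in cube1:
--         cube1.add(9)
--     if 9 in cube1:
--         cube1.add(6)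
--
--     if 6 in cube2:
--         cube2.add(9)
--     if 9 in cube2:
--         cube2.add(6)
--
--
--     # form all possible cube combinations
--     cube1 = list(cube1)
--     cube2 = list(cube2)
--     cube_combos = []
--     for c1 in cube1:
--         for c2 in cube2:
--             cube_combos.append((c1, c2))
--             cube_combos.append((c2, c1))
--
--     # remove valid combos from remaining squares
--     for combo in cube_combos:
--         if combo in perfect_squares:
--             perfect_squares.remove(combo)
--
--     # if there are no valid combos left,
--     # then you can make all of the perfect squares
--     return len(perfect_squares) == 0
-- ===== SOURCE B (Python) =====
-- def check_dice(die1, die2):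
--     # B: instead of enumerating every ordered cross-product pair and deleting
--     # matches from the target set, iterate over the nine required square pairs
--     # and test directly whether each can be shown by the two dice.
--     perfect_squares = [
--         (0, 1), (0, 4), (0, 9), (1, 6), (2, 5),
--         (3, 6), (4, 9), (6, 4), (8, 1),
--     ]
--
--     cube1 = set(die1)
--     cube2 = set(die2)
--     if 6 in cube1:
--         cube1.add(9)
--     if 9 in cube1:
--         cube1.add(6)
--     if 6 in cube2:
--         cube2.add(9)
--     if 9 in cube2:
--         cube2.add(6)
--
--     return all(
--         (a in cube1 and b in cube2) or (a in cube2 and b in cube1)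
--         for a, b in perfect_squares
--     )
-- ===== Notes on version B (the rewrite author's own statement) =====
-- stated objective: faster
-- what changed: B inverts the traversal: instead of enumerating all ordered cross-product pairs of the two (augmented) digit sets into a list and deleting matches from the target set, B loops over the nine required square pairs and tests each directly for producibility via set membership.
import Mathlib
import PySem

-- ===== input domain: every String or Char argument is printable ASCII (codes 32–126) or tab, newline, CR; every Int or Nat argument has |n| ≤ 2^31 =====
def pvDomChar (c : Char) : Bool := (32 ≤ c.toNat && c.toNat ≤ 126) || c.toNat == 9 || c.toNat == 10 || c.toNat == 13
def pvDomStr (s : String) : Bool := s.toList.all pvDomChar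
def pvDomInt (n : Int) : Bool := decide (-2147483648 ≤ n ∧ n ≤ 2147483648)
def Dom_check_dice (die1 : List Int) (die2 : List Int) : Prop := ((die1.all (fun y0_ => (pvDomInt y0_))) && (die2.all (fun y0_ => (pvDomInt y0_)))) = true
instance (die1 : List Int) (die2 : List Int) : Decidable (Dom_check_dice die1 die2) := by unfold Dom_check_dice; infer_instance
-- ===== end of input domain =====

-- B iterates over the nine target square pairs and tests each for producibility by set
-- membership, instead of A's enumeration of every ordered cross-product pair followed by
-- deletion from the target set; objective: simpler.

-- ===== PORT A =====
-- the shared set-augmentation step (identical in both Pythons): set(die) plus the 6/9 rule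
def pvCube (die : List Int) : PySem.Set Int :=
  let c := PySem.Set.ofList die
  let c := if c.contains 6 then c.add 9 else c
  let c := if c.contains 9 then c.add 6 else c
  c

def pvSquares : List (Int × Int) :=
  [(0, 1), (0, 4), (0, 9), (1, 6), (2, 5), (3, 6), (4, 9), (6, 4), (8, 1)]

def check_dice (die1 : List Int) (die2 : List Int) : Bool :=
  let perfect_squares : PySem.Set (Int × Int) := PySem.Set.ofList pvSquares
  let cube1 := pvCube die1
  let cube2 := pvCube die2
  -- form all possible cube combinations
  let cube_combos : List (Int × Int) :=
    cube1.foldl (fun acc c1 =>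
      cube2.foldl (fun acc c2 => acc ++ [(c1, c2)] ++ [(c2, c1)]) acc) []
  -- remove valid combos from the remaining squares
  -- ('if combo in ps: ps.remove(combo)' is exact as Set.discard under the guard)
  let remaining := cube_combos.foldl
    (fun ps combo => if ps.contains combo then ps.discard combo else ps) perfect_squares
  PySem.Set.len remaining == 0

-- ===== PORT B =====
def check_dice_alt (die1 : List Int) (die2 : List Int) : Bool :=
  let cube1 := pvCube die1
  let cube2 := pvCube die2
  pvSquares.all (fun p =>
    (cube1.contains p.1 && cube2.contains p.2) || (cube2.contains p.1 && cube1.contains p.2))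

-- ===== PRECONDITION & SPEC =====
def Spec_check_dice (die1 : List Int) (die2 : List Int) (out : Bool) : Prop := out = check_dice_alt die1 die2
instance (die1 : List Int) (die2 : List Int) (out : Bool) : Decidable (Spec_check_dice die1 die2 out) := by unfold Spec_check_dice; infer_instance

-- ===== CLAIM (what is proved, stated in full; the proofs are below) =====
def Claim_equal_check_dice : Prop := ∀ (die1 : List Int) (die2 : List Int), Dom_check_dice die1 die2 → Spec_check_dice die1 die2 (check_dice die1 die2)

-- ===== LEMMAS AND PROOFS =====

-- the deletion loop keeps exactly the squares that never occur among the combos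
theorem mem_removeFold (L : List (Int × Int)) (s : PySem.Set (Int × Int)) (x : Int × Int) :
    x ∈ L.foldl (fun ps combo => if ps.contains combo then ps.discard combo else ps) s ↔
      x ∈ s ∧ x ∉ L := by
  induction L generalizing s with
  | nil => simp
  | cons c t ih =>
    simp only [List.foldl_cons, ih, List.mem_cons]
    constructor
    · rintro ⟨hx, hnt⟩
      split at hx
      · rw [PySem.Set.mem_discard] at hx
        exact ⟨hx.1, by rintro (rfl | h) <;> [exact hx.2 rfl; exact hnt h]⟩
      · rename_i hc
        refine ⟨hx, ?_⟩
        rintro (rfl | h)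
        · exact hc ((PySem.Set.contains_iff s x).mpr hx)
        · exact hnt h
    · rintro ⟨hx, hn⟩
      refine ⟨?_, fun h => hn (Or.inr h)⟩
      split
      · exact (PySem.Set.mem_discard s c x).mpr ⟨hx, fun h => hn (Or.inl h)⟩
      · exact hx

-- the cross-product loop builds exactly the ordered pairs in both directions
theorem mem_combos (c1 c2 : PySem.Set Int) (x : Int × Int) :
    x ∈ c1.foldl (fun acc a =>
        c2.foldl (fun acc b => acc ++ [(a, b)] ++ [(b, a)]) acc) [] ↔
      (x.1 ∈ c1 ∧ x.2 ∈ c2) ∨ (x.2 ∈ c1 ∧ x.1 ∈ c2) := by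
  have h : ∀ (acc : List (Int × Int)),
      c1.foldl (fun acc a => c2.foldl (fun acc b => acc ++ [(a, b)] ++ [(b, a)]) acc) acc
        = acc ++ c1.flatMap (fun a => c2.flatMap (fun b => [(a, b), (b, a)])) := by
    intro acc
    have hin : ∀ (a : Int) (acc : List (Int × Int)),
        c2.foldl (fun acc b => acc ++ [(a, b)] ++ [(b, a)]) acc
          = acc ++ c2.flatMap (fun b => [(a, b), (b, a)]) := by
      intro a acc
      have := PySem.List.foldl_append_eq_flatMap (fun b => [(a, b), (b, a)]) c2 acc
      simpa using this
    induction c1 generalizing acc with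
    | nil => simp
    | cons a t ih =>
      rw [List.foldl_cons, hin, ih]
      simp [List.append_assoc]
  rw [h]
  cases x with
  | mk u v =>
    simp only [List.nil_append, List.mem_flatMap, List.mem_cons, List.not_mem_nil,
      or_false, Prod.mk.injEq]
    constructor
    · rintro ⟨a, ha, b, hb, (⟨rfl, rfl⟩ | ⟨rfl, rfl⟩)⟩
      · exact Or.inl ⟨ha, hb⟩
      · exact Or.inr ⟨ha, hb⟩
    · rintro (⟨hu, hv⟩ | ⟨hv, hu⟩)
      · exact ⟨u, hu, v, hv, Or.inl ⟨rfl, rfl⟩⟩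
      · exact ⟨v, hv, u, hu, Or.inr ⟨rfl, rfl⟩⟩

-- ===== VERDICT (by name: the statement is the Claim_ definition above) =====
theorem check_dice_spec : Claim_equal_check_dice := by
  intro die1 die2 _
  unfold Spec_check_dice check_dice check_dice_alt
  rw [Bool.eq_iff_iff]
  simp only [beq_iff_eq]
  set c1 := pvCube die1 with hc1
  set c2 := pvCube die2 with hc2
  set combos := c1.foldl (fun acc a =>
      c2.foldl (fun acc b => acc ++ [(a, b)] ++ [(b, a)]) acc) [] with hcombos
  have hlen : PySem.Set.len
      (combos.foldl (fun ps combo => if ps.contains combo then ps.discard combo else ps)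
        (PySem.Set.ofList pvSquares)) = 0 ↔
      ∀ x ∈ pvSquares, x ∈ combos := by
    unfold PySem.Set.len
    rw [show ((combos.foldl (fun ps combo => if ps.contains combo then ps.discard combo else ps)
        (PySem.Set.ofList pvSquares)).length : Int) = 0 ↔
        (combos.foldl (fun ps combo => if ps.contains combo then ps.discard combo else ps)
        (PySem.Set.ofList pvSquares)) = [] by
      simp [List.length_eq_zero_iff]]
    rw [List.eq_nil_iff_forall_not_mem]
    constructor
    · intro h x hx
      have := h x
      rw [mem_removeFold] at this
      by_contra hn
      exact this ⟨(PySem.Set.mem_ofList _ _).mpr hx, hn⟩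
    · intro h x
      rw [mem_removeFold]
      rintro ⟨hxs, hxn⟩
      exact hxn (h x ((PySem.Set.mem_ofList _ _).mp hxs))
  rw [hlen]
  simp only [List.all_eq_true, Bool.or_eq_true, Bool.and_eq_true, PySem.Set.contains_iff]
  constructor
  · intro h p hp
    have := h p hp
    rw [mem_combos] at this
    tauto
  · intro h x hx
    rw [mem_combos]
    have := h x hx
    tauto
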